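-- pv_equiv track=rewrite | github.com/TigranKocharyan/PicsartTasks | Day4.py | sort_par
-- ===== SOURCE A (Python) =====
-- def sort_par(arr):
--     new_arr = []
--     for i in range(len(arr)):
--         if i % 2 == 0:
--             new_arr.insert(0, i)
--         if i % 2 != 0:
--             new_arr.append(i)
--     return(new_arr)
-- ===== SOURCE B (Python) =====
-- def sort_par(arr):
--     # Even indices in descending order, then odd indices ascending: built
--     # directly with two ranges instead of repeated insert(0, ...) (O(n) vs O(n^2)).
--     n = len(arr)
--     return list(range(n - 2 + n % 2, -1, -2)) + list(range(1, n, 2))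
-- ===== Notes on version B (the rewrite author's own statement) =====
-- stated objective: faster
-- what changed: Replaces the loop that repeatedly does insert(0, i)/append with a direct construction of the result from two ranges: descending even indices followed by ascending odd indices.
import Mathlib
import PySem

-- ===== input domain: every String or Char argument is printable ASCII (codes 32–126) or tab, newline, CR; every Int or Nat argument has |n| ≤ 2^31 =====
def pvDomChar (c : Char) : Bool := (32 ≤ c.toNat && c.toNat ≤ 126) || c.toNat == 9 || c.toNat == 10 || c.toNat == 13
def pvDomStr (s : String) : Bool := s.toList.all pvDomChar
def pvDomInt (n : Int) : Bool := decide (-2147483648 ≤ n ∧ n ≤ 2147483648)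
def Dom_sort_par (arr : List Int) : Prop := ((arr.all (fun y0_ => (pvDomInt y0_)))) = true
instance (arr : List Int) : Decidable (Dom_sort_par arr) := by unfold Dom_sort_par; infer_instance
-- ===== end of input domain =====

-- B replaces A's quadratic insert(0,·)/append loop by directly building the two
-- index ranges (descending evens, then ascending odds); objective: faster (asymptotic).

-- ===== PORT A =====
-- for i in range(len(arr)): insert(0, i) at index 0 is cons, append is ++ [i]
def sort_par (arr : List Int) : List Int :=
  (PySem.List.pyRange 0 (arr.length : Int) 1).foldl
    (fun new_arr i =>
      let new_arr' := if PySem.Int.mod i 2 = 0 then i :: new_arr else new_arr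
      if PySem.Int.mod i 2 ≠ 0 then new_arr' ++ [i] else new_arr')
    []

-- ===== PORT B =====
-- list(range(n - 2 + n % 2, -1, -2)) + list(range(1, n, 2))
def sort_par_alt (arr : List Int) : List Int :=
  PySem.List.pyRange ((arr.length : Int) - 2 + PySem.Int.mod (arr.length : Int) 2) (-1) (-2)
    ++ PySem.List.pyRange 1 (arr.length : Int) 2

-- ===== PRECONDITION & SPEC =====
def Spec_sort_par (arr : List Int) (out : List Int) : Prop := out = sort_par_alt arr
instance (arr : List Int) (out : List Int) : Decidable (Spec_sort_par arr out) := by unfold Spec_sort_par; infer_instance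

-- ===== CLAIM (what is proved, stated in full; the proofs are below) =====
def Claim_equal_sort_par : Prop := ∀ (arr : List Int), Dom_sort_par arr → Spec_sort_par arr (sort_par arr)

-- ===== LEMMAS AND PROOFS =====

-- A's loop body, named for the proofs (syntactically identical to the lambda in sort_par)
def pvF : List Int → Int → List Int :=
  fun new_arr i =>
    let new_arr' := if PySem.Int.mod i 2 = 0 then i :: new_arr else new_arr
    if PySem.Int.mod i 2 ≠ 0 then new_arr' ++ [i] else new_arr'

-- B's two ranges, named for the proofs
def pvE (n : Int) : List Int :=
  PySem.List.pyRange (n - 2 + PySem.Int.mod n 2) (-1) (-2)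
def pvO (n : Int) : List Int := PySem.List.pyRange 1 n 2

lemma pvMod_natCast (n : Nat) : PySem.Int.mod (n : Int) 2 = ((n % 2 : Nat) : Int) := by
  rw [PySem.Int.mod_eq_emod_of_pos (by norm_num)]; omega

lemma pvF_even (acc : List Int) (n : Nat) (h : n % 2 = 0) :
    pvF acc (n : Int) = (n : Int) :: acc := by
  unfold pvF
  rw [pvMod_natCast]
  simp [h]

lemma pvF_odd (acc : List Int) (n : Nat) (h : n % 2 = 1) :
    pvF acc (n : Int) = acc ++ [(n : Int)] := by
  unfold pvF
  rw [pvMod_natCast]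
  simp [h]

-- pyRange with a negative step, in range/map normal form (proved by unfolding the primitive)
lemma pvPyRange_of_neg (a b : Int) {s : Int} (hs : s < 0) :
    PySem.List.pyRange a b s =
      (List.range (if b < a then ((a - b + (-s) - 1) / (-s)).toNat else 0)).map
        (fun (k : Nat) => a + s * (k : Int)) := by
  unfold PySem.List.pyRange
  rw [if_neg (by omega), if_neg (by omega)]

lemma pvO_eq (n : Nat) :
    pvO (n : Int) = (List.range (n / 2)).map (fun (k : Nat) => (1 : Int) + 2 * (k : Int)) := by
  unfold pvO
  rw [PySem.List.pyRange_of_pos 1 (n : Int) (by norm_num)]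
  have hc : (if (1 : Int) < (n : Int) then (((n : Int) - 1 + 2 - 1) / 2).toNat else 0) = n / 2 := by
    split_ifs <;> omega
  rw [hc]

lemma pvE_eq (n : Nat) :
    pvE (n : Int) = (List.range ((n + 1) / 2)).map
      (fun (k : Nat) => (n : Int) - 2 + ((n % 2 : Nat) : Int) - 2 * (k : Int)) := by
  unfold pvE
  rw [pvMod_natCast, pvPyRange_of_neg _ _ (show (-2 : Int) < 0 by norm_num)]
  simp only [show (- -2 : Int) = 2 from by norm_num]
  have hc : (if (-1 : Int) < (n : Int) - 2 + ((n % 2 : Nat) : Int)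
      then (((n : Int) - 2 + ((n % 2 : Nat) : Int) - (-1) + 2 - 1) / 2).toNat else 0)
      = (n + 1) / 2 := by
    split_ifs <;> omega
  rw [hc]
  apply List.map_congr_left
  intro k _
  ring

lemma pvO_succ_even (n : Nat) (h : n % 2 = 0) : pvO ((n : Int) + 1) = pvO (n : Int) := by
  have h1 : ((n : Int) + 1) = ((n + 1 : Nat) : Int) := by push_cast; ring
  rw [h1, pvO_eq, pvO_eq]
  have : (n + 1) / 2 = n / 2 := by omega
  rw [this]

lemma pvO_succ_odd (n : Nat) (h : n % 2 = 1) :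
    pvO ((n : Int) + 1) = pvO (n : Int) ++ [(n : Int)] := by
  have h1 : ((n : Int) + 1) = ((n + 1 : Nat) : Int) := by push_cast; ring
  rw [h1, pvO_eq, pvO_eq]
  have hc : (n + 1) / 2 = n / 2 + 1 := by omega
  rw [hc, List.range_succ, List.map_append]
  congr 1
  simp only [List.map_cons, List.map_nil]
  congr 1
  omega

lemma pvE_succ_even (n : Nat) (h : n % 2 = 0) :
    pvE ((n : Int) + 1) = (n : Int) :: pvE (n : Int) := by
  have h1 : ((n : Int) + 1) = ((n + 1 : Nat) : Int) := by push_cast; ring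
  rw [h1, pvE_eq, pvE_eq]
  have hm : (n + 1) % 2 = 1 := by omega
  have hc : (n + 1 + 1) / 2 = (n + 1) / 2 + 1 := by omega
  rw [hm, hc, List.range_succ_eq_map, List.map_cons, List.map_map]
  congr 1
  · push_cast
    ring
  · apply List.map_congr_left
    intro k _
    simp only [Function.comp_apply]
    push_cast [h]
    ring

lemma pvE_succ_odd (n : Nat) (h : n % 2 = 1) :
    pvE ((n : Int) + 1) = pvE (n : Int) := by
  have h1 : ((n : Int) + 1) = ((n + 1 : Nat) : Int) := by push_cast; ring
  rw [h1, pvE_eq, pvE_eq]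
  have hm : (n + 1) % 2 = 0 := by omega
  have hc : (n + 1 + 1) / 2 = (n + 1) / 2 := by omega
  rw [hm, hc, h]
  apply List.map_congr_left
  intro k _
  push_cast
  ring

lemma pvLoop_eq (n : Nat) :
    (PySem.List.pyRange 0 (n : Int) 1).foldl pvF [] = pvE (n : Int) ++ pvO (n : Int) := by
  induction n with
  | zero => decide
  | succ n ih =>
    have hr : PySem.List.pyRange 0 ((n : Int) + 1) 1 =
        PySem.List.pyRange 0 (n : Int) 1 ++ [(n : Int)] :=
      PySem.List.pyRange_one_succ_right (by positivity)
    push_cast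
    rw [hr, List.foldl_append]
    rcases Nat.even_or_odd n with he | ho
    · have h : n % 2 = 0 := Nat.even_iff.mp he
      simp only [List.foldl_cons, List.foldl_nil]
      rw [ih, pvF_even _ _ h, pvE_succ_even n h, pvO_succ_even n h, List.cons_append]
    · have h : n % 2 = 1 := Nat.odd_iff.mp ho
      simp only [List.foldl_cons, List.foldl_nil]
      rw [ih, pvF_odd _ _ h, pvE_succ_odd n h, pvO_succ_odd n h, List.append_assoc]

-- ===== VERDICT (by name: the statement is the Claim_ definition above) =====
theorem sort_par_spec : Claim_equal_sort_par := by
  intro arr _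
  show sort_par arr = sort_par_alt arr
  have : sort_par arr = (PySem.List.pyRange 0 (arr.length : Int) 1).foldl pvF [] := rfl
  rw [this, pvLoop_eq arr.length]
  rfl
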